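-- pv_equiv track=rewrite | github.com/MartinSeeler/Advent-of-Code | 2020/day21/solution.py | parse
-- ===== SOURCE A (Python) =====
-- from collections import defaultdict
--
-- def parse(text: str):
--   possible_mapping = {}
--   counter = defaultdict(lambda: 0)
--   for line in text.splitlines():
--     parts = line.split(" (contains")
--     ingredients, alergens = parts[0].strip().split(" "), parts[1][:-1].strip().split(", ")
--     for i in ingredients:
--       counter[i] += 1
--     for al in alergens:
--       if al in possible_mapping:
--         possible_mapping[al] &= set(ingredients)
--       else:
--         possible_mapping[al] = set(ingredients)
--   return possible_mapping, counter
-- ===== SOURCE B (Python) =====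
-- from collections import defaultdict
--
-- def parse(text: str):
--   # Pass 1: group each allergen's ingredient-sets; count ingredients.
--   groups = defaultdict(list)
--   counter = defaultdict(lambda: 0)
--   for line in text.splitlines():
--     parts = line.split(" (contains")
--     ingredients = parts[0].strip().split(" ")
--     for i in ingredients:
--       counter[i] += 1
--     ing_set = set(ingredients)
--     for al in parts[1][:-1].strip().split(", "):
--       groups[al].append(ing_set)
--   # Pass 2: reduce each group by set intersection.
--   possible_mapping = {}
--   for al, sets in groups.items():
--     common = sets[0]
--     for s in sets[1:]:
--       common = common & s
--     possible_mapping[al] = common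
--   return possible_mapping, counter
-- ===== Notes on version B (the rewrite author's own statement) =====
-- stated objective: alternative
-- what changed: B first groups each allergen's ingredient-sets in a defaultdict(list) during the line pass, then builds possible_mapping in a separate reduce pass intersecting each group, instead of A's incremental '&=' accumulation inside the parse loop.
import Mathlib
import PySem

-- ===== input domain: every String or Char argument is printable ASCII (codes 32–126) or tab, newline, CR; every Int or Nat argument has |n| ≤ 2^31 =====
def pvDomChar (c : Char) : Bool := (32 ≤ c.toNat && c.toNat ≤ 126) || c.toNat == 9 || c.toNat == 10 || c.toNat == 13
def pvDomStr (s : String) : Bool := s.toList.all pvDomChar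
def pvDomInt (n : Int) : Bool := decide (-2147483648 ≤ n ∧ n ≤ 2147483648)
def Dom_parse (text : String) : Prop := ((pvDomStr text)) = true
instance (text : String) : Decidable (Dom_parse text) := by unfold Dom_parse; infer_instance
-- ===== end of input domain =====

-- B replaces A's incremental '&=' accumulation by grouping each allergen's ingredient-sets
-- and reducing each group by intersection in a second pass (objective: alternative decomposition).

-- ===== PORT A =====
def parseStepA (st : PySem.Dict String (PySem.Set String) × PySem.Dict String Int)
    (line : String) :
    PySem.Dict String (PySem.Set String) × PySem.Dict String Int :=
  let parts := (PySem.Str.split? line " (contains").getD []   -- sep ≠ "", always some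
  let ingredients := (PySem.Str.split? (PySem.Str.strip (parts.headD "")) " ").getD []
  -- parts[1]: pyGet? none = Python IndexError, excluded by Pre_parse (total via getD)
  let p1 := (PySem.List.pyGet? parts 1).getD ""
  let alergens := (PySem.Str.split? (PySem.Str.strip (PySem.Str.slice p1 none (some (-1)))) ", ").getD []
  let counter := ingredients.foldl (fun d i => d.modify i 0 (· + 1)) st.2
  let pm := alergens.foldl (fun pm al =>
      if pm.contains al then
        pm.insert al (PySem.Set.inter (pm.getD al []) (PySem.Set.ofList ingredients))
      else
        pm.insert al (PySem.Set.ofList ingredients)) st.1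
  (pm, counter)

def parse (text : String) : (List (String × List String)) × (List (String × Int)) :=
  let st := (PySem.Str.splitlines text).foldl parseStepA (PySem.Dict.empty, PySem.Dict.empty)
  (st.1.items, st.2.items)

-- ===== PORT B =====
-- helper of Source B: _intersect_all(sets) = sets[0] ∩ sets[1] ∩ …
def interAll (sets : List (PySem.Set String)) : PySem.Set String :=
  (PySem.List.slice sets (some 1) none).foldl PySem.Set.inter
    ((PySem.List.pyGet? sets 0).getD [])   -- sets[0]; groups' lists are never empty

def parseStepB (st : PySem.Dict String (List (PySem.Set String)) × PySem.Dict String Int)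
    (line : String) :
    PySem.Dict String (List (PySem.Set String)) × PySem.Dict String Int :=
  let parts := (PySem.Str.split? line " (contains").getD []
  let ingredients := (PySem.Str.split? (PySem.Str.strip (parts.headD "")) " ").getD []
  let counter := ingredients.foldl (fun d i => d.modify i 0 (· + 1)) st.2
  let ingSet := PySem.Set.ofList ingredients
  let p1 := (PySem.List.pyGet? parts 1).getD ""
  let als := (PySem.Str.split? (PySem.Str.strip (PySem.Str.slice p1 none (some (-1)))) ", ").getD []
  let groups := als.foldl (fun g al => g.modify al [] (· ++ [ingSet])) st.1
  (groups, counter)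

def parse_alt (text : String) : (List (String × List String)) × (List (String × Int)) :=
  let st := (PySem.Str.splitlines text).foldl parseStepB (PySem.Dict.empty, PySem.Dict.empty)
  let pm := st.1.items.foldl (fun pm p => pm.insert p.1 (interAll p.2)) PySem.Dict.empty
  (pm.items, st.2.items)

-- ===== PRECONDITION & SPEC =====
-- Pre_ excludes texts with a line lacking " (contains", on which A raises IndexError (B raises too).
def Pre_parse (text : String) : Prop :=
  ∀ line ∈ PySem.Str.splitlines text, PySem.Str.isIn " (contains" line = true
instance (text : String) : Decidable (Pre_parse text) := by unfold Pre_parse; infer_instance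
def pvWitness_parse : String := "a b (contains x, y)\nb c (contains x)"

def Spec_parse (text : String) (out : (List (String × List String)) × (List (String × Int))) : Prop := out = parse_alt text
instance (text : String) (out : (List (String × List String)) × (List (String × Int))) : Decidable (Spec_parse text out) := by unfold Spec_parse; infer_instance

-- ===== CLAIM (what is proved, stated in full; the proofs are below) =====
def Claim_equal_parse : Prop := ∀ (text : String), Dom_parse text → Pre_parse text → Spec_parse text (parse text)

-- ===== LEMMAS AND PROOFS =====

-- invariant: A's mapping is B's groups with every group reduced by interAll
def InvAB (pm : PySem.Dict String (PySem.Set String))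
    (g : PySem.Dict String (List (PySem.Set String))) : Prop :=
  pm.keys = g.keys ∧ (∀ k, pm.get? k = (g.get? k).map interAll) ∧
    (∀ k v, g.get? k = some v → v ≠ [])

theorem interAll_cons (x : PySem.Set String) (xs : List (PySem.Set String)) :
    interAll (x :: xs) = xs.foldl PySem.Set.inter x := by
  simp [interAll, PySem.List.slice, PySem.List.pyGet?, PySem.List.pyIdx?]

theorem interAll_append_singleton (v : List (PySem.Set String)) (hv : v ≠ [])
    (S : PySem.Set String) :
    interAll (v ++ [S]) = PySem.Set.inter (interAll v) S := by
  obtain ⟨x, xs, rfl⟩ := List.exists_cons_of_ne_nil hv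
  rw [List.cons_append, interAll_cons, interAll_cons, List.foldl_append]
  simp

theorem step1 (al : String) (S : PySem.Set String)
    (pm : PySem.Dict String (PySem.Set String))
    (g : PySem.Dict String (List (PySem.Set String)))
    (hinv : InvAB pm g) (hnd : g.keys.Nodup) :
    InvAB (if pm.contains al then
          pm.insert al (PySem.Set.inter (pm.getD al []) S)
         else pm.insert al S)
        (g.modify al [] (· ++ [S])) ∧ (g.modify al [] (· ++ [S])).keys.Nodup := by
  obtain ⟨hk, hget, hne⟩ := hinv
  have hcont : pm.contains al = g.contains al := by
    rw [PySem.Dict.contains_eq_isSome_get?, PySem.Dict.contains_eq_isSome_get?, hget]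
    cases g.get? al <;> simp
  have hmod : g.modify al [] (· ++ [S]) = g.insert al (g.getD al [] ++ [S]) := rfl
  refine ⟨⟨?_, ?_, ?_⟩, ?_⟩
  · -- keys
    rw [hmod]
    by_cases h : g.contains al = true
    · rw [if_pos (hcont ▸ h), PySem.Dict.keys_insert_of_contains _ _ (hcont ▸ h),
        PySem.Dict.keys_insert_of_contains _ _ h, hk]
    · have h' : g.contains al = false := by simpa using h
      rw [if_neg (by simp [hcont, h']), PySem.Dict.keys_insert_of_not_contains _ _ (by simp [hcont, h']),
        PySem.Dict.keys_insert_of_not_contains _ _ h', hk]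
  · -- get?
    intro k
    rw [hmod]
    by_cases hck : k = al
    · subst hck
      by_cases h : g.contains k = true
      · rw [if_pos (hcont ▸ h), PySem.Dict.get?_insert_self, PySem.Dict.get?_insert_self]
        have hsome : ∃ v, g.get? k = some v := by
          rw [PySem.Dict.contains_eq_isSome_get?] at h
          cases hgv : g.get? k with
          | none => rw [hgv] at h; simp at h
          | some v => exact ⟨v, rfl⟩
        obtain ⟨v, hv⟩ := hsome
        have hpmd : pm.getD k [] = interAll v := by
          rw [PySem.Dict.getD_eq_get?_getD, hget, hv]; rfl
        have hgd : g.getD k [] = v := by rw [PySem.Dict.getD_eq_get?_getD, hv]; rfl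
        rw [hpmd, hgd, Option.map_some, interAll_append_singleton v (hne k v hv) S]
      · have h' : g.contains k = false := by simpa using h
        rw [if_neg (by simp [hcont, h']), PySem.Dict.get?_insert_self, PySem.Dict.get?_insert_self]
        have hgd : g.getD k [] = [] := PySem.Dict.getD_of_not_contains _ _ h'
        rw [hgd, Option.map_some, List.nil_append, interAll_cons]
        simp
    · by_cases h : pm.contains al = true <;>
        simp only [h, Bool.false_eq_true, if_false, if_true] <;>
        rw [PySem.Dict.get?_insert_of_ne _ _ hck, PySem.Dict.get?_insert_of_ne _ _ hck,
          hget]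
  · -- values nonempty
    intro k v hv
    rw [hmod] at hv
    by_cases hck : k = al
    · subst hck
      rw [PySem.Dict.get?_insert_self] at hv
      cases hv
      simp
    · rw [PySem.Dict.get?_insert_of_ne _ _ hck] at hv
      exact hne k v hv
  · -- nodup keys
    rw [hmod]
    by_cases h : g.contains al = true
    · rw [PySem.Dict.keys_insert_of_contains _ _ h]; exact hnd
    · have h' : g.contains al = false := by simpa using h
      rw [PySem.Dict.keys_insert_of_not_contains _ _ h']
      refine List.Nodup.append hnd (List.nodup_singleton _) ?_
      intro x hx hx'
      simp at hx'
      subst hx'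
      rw [← PySem.Dict.contains_iff_mem_keys] at hx
      simp [hx] at h'

theorem inner (als : List String) (S : PySem.Set String) :
    ∀ (pm : PySem.Dict String (PySem.Set String))
      (g : PySem.Dict String (List (PySem.Set String))),
      InvAB pm g → g.keys.Nodup →
      InvAB (als.foldl (fun pm al =>
            if pm.contains al then
              pm.insert al (PySem.Set.inter (pm.getD al []) S)
            else pm.insert al S) pm)
          (als.foldl (fun g al => g.modify al [] (· ++ [S])) g) ∧
        (als.foldl (fun g al => g.modify al [] (· ++ [S])) g).keys.Nodup := by
  induction als with
  | nil => intro pm g hinv hnd; exact ⟨hinv, hnd⟩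
  | cons a as ih =>
    intro pm g hinv hnd
    obtain ⟨hinv', hnd'⟩ := step1 a S pm g hinv hnd
    simpa using ih _ _ hinv' hnd'

theorem main_fold (lines : List String) :
    ∀ (pm : PySem.Dict String (PySem.Set String))
      (g : PySem.Dict String (List (PySem.Set String)))
      (c : PySem.Dict String Int),
      InvAB pm g → g.keys.Nodup →
      InvAB (lines.foldl parseStepA (pm, c)).1 (lines.foldl parseStepB (g, c)).1 ∧
        (lines.foldl parseStepB (g, c)).1.keys.Nodup ∧
        (lines.foldl parseStepA (pm, c)).2 = (lines.foldl parseStepB (g, c)).2 := by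
  induction lines with
  | nil => intro pm g c hinv hnd; exact ⟨hinv, hnd, rfl⟩
  | cons l ls ih =>
    intro pm g c hinv hnd
    simp only [List.foldl_cons]
    obtain ⟨hinv', hnd'⟩ := inner _ _ pm g hinv hnd
    exact ih _ _ _ hinv' hnd'

theorem items_of_invAB (pm : PySem.Dict String (PySem.Set String))
    (g : PySem.Dict String (List (PySem.Set String)))
    (hinv : InvAB pm g) (hnd : g.keys.Nodup) :
    pm.items = g.items.map (fun p => (p.1, interAll p.2)) := by
  obtain ⟨hk, hget, _⟩ := hinv
  rw [PySem.Dict.items_eq_map_keys pm (hk ▸ hnd) [],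
    PySem.Dict.items_eq_map_keys g hnd [], List.map_map, hk]
  refine List.map_congr_left ?_
  intro k hkmem
  have hsome : ∃ v, g.get? k = some v := by
    cases hgv : g.get? k with
    | none => exact absurd ((PySem.Dict.get?_eq_none_iff_not_mem_keys _ _).mp hgv) (by simp [hkmem])
    | some v => exact ⟨v, rfl⟩
  obtain ⟨v, hv⟩ := hsome
  simp [PySem.Dict.getD_eq_get?_getD, hget, hv]

-- ===== VERDICT (by name: the statement is the Claim_ definition above) =====
theorem parse_spec : Claim_equal_parse := by
  unfold Claim_equal_parse
  intro text _ _
  unfold Spec_parse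
  simp only [parse, parse_alt]
  have hinv0 : InvAB PySem.Dict.empty PySem.Dict.empty := by
    refine ⟨rfl, ?_, ?_⟩ <;> intro k <;> simp [PySem.Dict.get?_empty]
  obtain ⟨hinv, hnd, hc⟩ := main_fold (PySem.Str.splitlines text)
    PySem.Dict.empty PySem.Dict.empty PySem.Dict.empty hinv0 (by simp [PySem.Dict.keys_empty])
  have hfresh := PySem.Dict.items_foldl_insert_fresh
    ((PySem.Str.splitlines text).foldl parseStepB (PySem.Dict.empty, PySem.Dict.empty)).1.items
    (fun p => p.1) (fun p => interAll p.2) PySem.Dict.empty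
    (fun a _ => PySem.Dict.contains_empty _) hnd
  show (((PySem.Str.splitlines text).foldl parseStepA (PySem.Dict.empty, PySem.Dict.empty)).1.items,
        ((PySem.Str.splitlines text).foldl parseStepA (PySem.Dict.empty, PySem.Dict.empty)).2.items) =
       ((((PySem.Str.splitlines text).foldl parseStepB (PySem.Dict.empty, PySem.Dict.empty)).1.items.foldl
          (fun pm p => pm.insert p.1 (interAll p.2)) PySem.Dict.empty).items,
        ((PySem.Str.splitlines text).foldl parseStepB (PySem.Dict.empty, PySem.Dict.empty)).2.items)
  refine Prod.ext ?_ (congrArg PySem.Dict.items hc)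
  rw [items_of_invAB _ _ hinv hnd]
  rw [hfresh]
  rfl
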